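-- pv_equiv track=rewrite | github.com/anandmsak/S2C_Finall-_V1 | src/wire_graph.py | remap_edges
-- ===== SOURCE A (Python) =====
-- def remap_edges(edges, mapping):
--     uniq = {}
--     for u, v, pix in edges:
--         u2, v2 = mapping[u], mapping[v]
--         if u2 == v2:
--             continue
--         if u2 > v2:
--             u2, v2 = v2, u2
--         key = (u2, v2)
--         if key not in uniq or len(pix) > len(uniq[key]):
--             uniq[key] = pix
--     return [(u, v, uniq[(u, v)]) for (u, v) in uniq.keys()]
-- ===== SOURCE B (Python) =====
-- def remap_edges(edges, mapping):
--     # Stage 1: normalize every edge to (sorted key, pix), dropping self-loops.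
--     norm = []
--     for u, v, pix in edges:
--         a, b = mapping[u], mapping[v]
--         if a != b:
--             norm.append(((min(a, b), max(a, b)), pix))
--     # Stage 2: distinct keys in first-appearance order.
--     seen = set()
--     keys = []
--     for k, _ in norm:
--         if k not in seen:
--             seen.add(k)
--             keys.append(k)
--     # Stage 3: per key, scan norm for its longest pix (max keeps the first maximal, matching A's strict-> update).
--     return [(u, v, max((p for k, p in norm if k == (u, v)), key=len)) for (u, v) in keys]
-- ===== Notes on version B (the rewrite author's own statement) =====
-- stated objective: alternative
-- what changed: A's single fused loop maintaining a dict with a running longest-pixel-list per key is replaced by three staged passes with no dict at all: normalize edges to (key,pix) pairs, collect distinct keys in first-appearance order with a set, then for each key rescan the normalized list and take max(..., key=len).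
import Mathlib
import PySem

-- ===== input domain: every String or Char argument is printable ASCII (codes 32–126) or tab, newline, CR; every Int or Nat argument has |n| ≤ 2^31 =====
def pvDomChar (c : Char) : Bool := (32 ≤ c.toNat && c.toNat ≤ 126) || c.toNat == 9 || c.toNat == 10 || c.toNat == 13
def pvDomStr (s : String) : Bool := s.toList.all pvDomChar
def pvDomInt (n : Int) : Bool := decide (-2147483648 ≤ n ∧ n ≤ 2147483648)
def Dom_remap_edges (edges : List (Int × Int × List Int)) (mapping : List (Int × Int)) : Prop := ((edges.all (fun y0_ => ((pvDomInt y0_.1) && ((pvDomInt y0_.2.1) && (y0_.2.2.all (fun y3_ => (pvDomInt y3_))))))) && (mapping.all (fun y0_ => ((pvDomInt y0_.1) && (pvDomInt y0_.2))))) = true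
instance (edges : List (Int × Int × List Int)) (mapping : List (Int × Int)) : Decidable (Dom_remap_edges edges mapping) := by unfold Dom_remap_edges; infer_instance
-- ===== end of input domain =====

-- B replaces A's fused dict-accumulating loop by three staged passes with no dict:
-- normalize edges, dedup keys in first-appearance order, then rescan per key for the
-- longest pixel list; objective: alternative decomposition (B is O(E*K), not faster).

-- shared helper: Python dict lookup mapping[k] (first match in the association list; none = KeyError)
def pvLook (mapping : List (Int × Int)) (k : Int) : Option Int :=
  (PySem.Dict.mk mapping).get? k

-- ===== PORT A =====
-- loop body of A's 'for u, v, pix in edges'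
def remapStepA (mapping : List (Int × Int)) (d : PySem.Dict (Int × Int) (List Int))
    (e : Int × Int × List Int) : PySem.Dict (Int × Int) (List Int) :=
  match pvLook mapping e.1, pvLook mapping e.2.1 with
  | some u2, some v2 =>
      if u2 = v2 then d
      else
        let key := if u2 > v2 then (v2, u2) else (u2, v2)
        match d.get? key with
        | none => d.insert key e.2.2
        | some cur => if e.2.2.length > cur.length then d.insert key e.2.2 else d
  | _, _ => d  -- unreachable under Pre_ (Python raises KeyError here)

def remap_edges (edges : List (Int × Int × List Int)) (mapping : List (Int × Int)) : List (Int × Int × List Int) :=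
  let uniq := edges.foldl (remapStepA mapping) PySem.Dict.empty
  -- [(u, v, uniq[(u, v)]) for (u, v) in uniq.keys()]  (the lookup always succeeds, so getD is exact)
  uniq.keys.map (fun k => (k.1, k.2, uniq.getD k []))

-- ===== PORT B =====
-- stage 1 loop body: 'if a != b: norm.append(((min(a,b), max(a,b)), pix))'
def normStepB (mapping : List (Int × Int)) (acc : List ((Int × Int) × List Int))
    (e : Int × Int × List Int) : List ((Int × Int) × List Int) :=
  match pvLook mapping e.1, pvLook mapping e.2.1 with
  | some a, some b => if a ≠ b then acc ++ [((min a b, max a b), e.2.2)] else acc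
  | _, _ => acc  -- unreachable under Pre_ (Python raises KeyError here)

-- stage 2 loop body: 'if k not in seen: seen.add(k); keys.append(k)'
def keyStepB (st : PySem.Set (Int × Int) × List (Int × Int)) (q : (Int × Int) × List Int) :
    PySem.Set (Int × Int) × List (Int × Int) :=
  if PySem.Set.contains st.1 q.1 then st else (PySem.Set.add st.1 q.1, st.2 ++ [q.1])

-- stage 3 comprehension body: 'max((p for k, p in norm if k == (u, v)), key=len)'
-- (every listed key occurs in norm, so the generator is nonempty and max? is some)
def bestB (norm : List ((Int × Int) × List Int)) (k : Int × Int) : List Int :=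
  (PySem.List.max? ((norm.filter (fun q => q.1 == k)).map (fun q => q.2))
    (fun l => l.length)).getD []

def remap_edges_alt (edges : List (Int × Int × List Int)) (mapping : List (Int × Int)) : List (Int × Int × List Int) :=
  let norm := edges.foldl (normStepB mapping) []
  let keys := (norm.foldl keyStepB (PySem.Set.empty, [])).2
  keys.map (fun k => (k.1, k.2, bestB norm k))

-- ===== PRECONDITION & SPEC =====
-- Pre_ excludes exactly the inputs where Python A raises KeyError: some edge endpoint missing from mapping.
def Pre_remap_edges (edges : List (Int × Int × List Int)) (mapping : List (Int × Int)) : Prop :=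
  ∀ e ∈ edges, (pvLook mapping e.1).isSome = true ∧ (pvLook mapping e.2.1).isSome = true
instance (edges : List (Int × Int × List Int)) (mapping : List (Int × Int)) : Decidable (Pre_remap_edges edges mapping) := by unfold Pre_remap_edges; infer_instance

def pvWitness_remap_edges : (List (Int × Int × List Int)) × (List (Int × Int)) :=
  ([(0, 1, [5, 6]), (1, 0, [7])], [(0, 2), (1, 3)])

def Spec_remap_edges (edges : List (Int × Int × List Int)) (mapping : List (Int × Int)) (out : List (Int × Int × List Int)) : Prop := out = remap_edges_alt edges mapping
instance (edges : List (Int × Int × List Int)) (mapping : List (Int × Int)) (out : List (Int × Int × List Int)) : Decidable (Spec_remap_edges edges mapping out) := by unfold Spec_remap_edges; infer_instance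

-- ===== CLAIM (what is proved, stated in full; the proofs are below) =====
def Claim_equal_remap_edges : Prop := ∀ (edges : List (Int × Int × List Int)) (mapping : List (Int × Int)), Dom_remap_edges edges mapping → Pre_remap_edges edges mapping → Spec_remap_edges edges mapping (remap_edges edges mapping)

-- ===== LEMMAS AND PROOFS =====

-- the normalized record one edge contributes (empty for self-loops / failed lookups)
def normOf (mapping : List (Int × Int)) (e : Int × Int × List Int) : List ((Int × Int) × List Int) :=
  normStepB mapping [] e

theorem normStepB_eq (mapping : List (Int × Int)) (acc : List ((Int × Int) × List Int))
    (e : Int × Int × List Int) : normStepB mapping acc e = acc ++ normOf mapping e := by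
  unfold normStepB normOf normStepB
  cases pvLook mapping e.1 with
  | none => simp
  | some a =>
    cases pvLook mapping e.2.1 with
    | none => simp
    | some b => by_cases h : a = b <;> simp [h]

theorem norm_eq_flatMap (mapping : List (Int × Int)) (edges : List (Int × Int × List Int)) :
    ∀ acc, edges.foldl (normStepB mapping) acc = acc ++ edges.flatMap (normOf mapping) := by
  induction edges with
  | nil => intro acc; simp
  | cons e es ih =>
      intro acc
      simp only [List.foldl_cons, List.flatMap_cons]
      rw [normStepB_eq, ih, List.append_assoc]

-- the stage-2 loop keeps seen = keys, and together they are exactly Set.update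
theorem keyLoop_eq (norm : List ((Int × Int) × List Int)) :
    ∀ s : PySem.Set (Int × Int),
      norm.foldl keyStepB (s, s)
        = (PySem.Set.update s (norm.map (·.1)), PySem.Set.update s (norm.map (·.1))) := by
  induction norm with
  | nil => intro s; simp [PySem.Set.update]
  | cons q n ih =>
      intro s
      have hstep : keyStepB (s, s) q = (PySem.Set.add s q.1, PySem.Set.add s q.1) := by
        unfold keyStepB PySem.Set.add
        by_cases h : q.1 ∈ s <;> simp [h]
      simp only [List.foldl_cons, List.map_cons, hstep, ih, PySem.Set.update_cons]

theorem firstKeys_eq (norm : List ((Int × Int) × List Int)) :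
    (norm.foldl keyStepB (PySem.Set.empty, [])).2 = PySem.Set.ofList (norm.map (·.1)) := by
  have h := keyLoop_eq norm PySem.Set.empty
  have he : (PySem.Set.empty : PySem.Set (Int × Int)) = ([] : List (Int × Int)) := rfl
  rw [he] at h ⊢
  rw [h]
  rfl

-- find? on a keyed map over a nodup key list
theorem find?_map_keyed (ks : List (Int × Int)) (f : Int × Int → List Int) (k : Int × Int)
    (hnd : ks.Nodup) :
    (ks.map (fun k' => (k', f k'))).find? (fun p => p.1 == k)
      = if k ∈ ks then some (k, f k) else none := by
  induction ks with
  | nil => simp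
  | cons a ks ih =>
      rw [List.nodup_cons] at hnd
      by_cases hk : a = k
      · subst hk
        rw [List.map_cons, List.find?_cons_of_pos (by simp)]
        simp
      · rw [List.map_cons, List.find?_cons_of_neg (by simp [hk]), ih hnd.2]
        by_cases hm : k ∈ ks <;> simp [hm, Ne.symm hk]

theorem max?_singleton (x : List Int) (key : List Int → Nat) :
    PySem.List.max? [x] key = some x := by
  simp [PySem.List.max?]

theorem max?_append_of_some (xs : List (List Int)) (x m : List Int) (key : List Int → Nat)
    (h : PySem.List.max? xs key = some m) :
    PySem.List.max? (xs ++ [x]) key = if key m < key x then some x else some m := by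
  unfold PySem.List.max? at h ⊢
  rw [List.foldl_append, h]
  rfl

-- bestB on an extended norm list
theorem bestB_append_other (n : List ((Int × Int) × List Int)) (k k' : Int × Int)
    (pix : List Int) (hne : k' ≠ k) :
    bestB (n ++ [(k, pix)]) k' = bestB n k' := by
  unfold bestB
  rw [List.filter_append]
  have hbeq : (k == k') = false := beq_eq_false_iff_ne.mpr (Ne.symm hne)
  have : List.filter (fun q => q.1 == k') [(k, pix)] = [] := by
    simp [List.filter, hbeq]
  rw [this, List.append_nil]

theorem bestB_append_new (n : List ((Int × Int) × List Int)) (k : Int × Int)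
    (pix : List Int) (hnot : k ∉ n.map (·.1)) :
    bestB (n ++ [(k, pix)]) k = pix := by
  unfold bestB
  have hfil : n.filter (fun q => q.1 == k) = [] := by
    rw [List.filter_eq_nil_iff]
    intro q hq
    have : q.1 ∈ n.map (·.1) := List.mem_map_of_mem hq
    simp only [beq_iff_eq]
    intro hk
    exact hnot (hk ▸ this)
  rw [List.filter_append, hfil]
  simp [List.filter, max?_singleton]

theorem bestB_some (n : List ((Int × Int) × List Int)) (k : Int × Int)
    (hmem : k ∈ n.map (·.1)) :
    PySem.List.max? ((n.filter (fun q => q.1 == k)).map (fun q => q.2)) (fun l => l.length)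
      = some (bestB n k) := by
  obtain ⟨q, hq, hk⟩ := List.mem_map.mp hmem
  have hne : (n.filter (fun q => q.1 == k)).map (fun q => q.2) ≠ [] := by
    have : q ∈ n.filter (fun q => q.1 == k) := by
      rw [List.mem_filter]; exact ⟨hq, by simp [hk]⟩
    intro h
    rw [List.map_eq_nil_iff] at h
    rw [h] at this
    exact absurd this (List.not_mem_nil)
  cases hmax : PySem.List.max? ((n.filter (fun q => q.1 == k)).map (fun q => q.2)) (fun l => l.length) with
  | none => exact absurd (((PySem.List.max?_eq_none_iff ..).mp hmax)) hne
  | some m => unfold bestB; rw [hmax]; rfl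

theorem bestB_append_old (n : List ((Int × Int) × List Int)) (k : Int × Int)
    (pix : List Int) (hmem : k ∈ n.map (·.1)) :
    bestB (n ++ [(k, pix)]) k
      = if pix.length > (bestB n k).length then pix else bestB n k := by
  have hsome := bestB_some n k hmem
  unfold bestB
  rw [List.filter_append, List.map_append]
  have h1 : List.filter (fun q => q.1 == k) [(k, pix)] = [(k, pix)] := by simp [List.filter]
  rw [h1, List.map_cons, List.map_nil, max?_append_of_some _ _ _ _ hsome, hsome]
  by_cases h : (bestB n k).length < pix.length <;> simp [h, gt_iff_lt]

-- overwriting a key with the value it already holds is the identity (keys unique)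
theorem insert_self_of_get? (d : PySem.Dict (Int × Int) (List Int)) (k : Int × Int) (cur : List Int)
    (h : d.get? k = some cur) (hn : d.keys.Nodup) : d.insert k cur = d := by
  have hc : d.contains k = true := by
    rw [PySem.Dict.contains_eq_isSome_get?, h]; rfl
  apply PySem.Dict.ext
  rw [PySem.Dict.items_insert_of_contains d cur hc]
  have hcongr : ∀ p ∈ d.items, (if (p.1 == k) = true then ((k, cur) : (Int × Int) × List Int) else p) = id p := by
    intro p hp
    by_cases hk : p.1 = k
    · have hget : d.get? p.1 = some p.2 := PySem.Dict.get?_of_mem_items d (by exact hp) hn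
      rw [hk, h] at hget
      have h2 : p.2 = cur := by simpa using hget.symm
      rw [if_pos (by simp [hk]), ← hk, ← h2]
      simp
    · simp [hk]
  rw [List.map_congr_left hcongr, List.map_id]

-- the dict invariant A's loop maintains, phrased against B's normalized list
def DInv (n : List ((Int × Int) × List Int)) (d : PySem.Dict (Int × Int) (List Int)) : Prop :=
  d.items = (PySem.Set.ofList (n.map (·.1))).map (fun k => (k, bestB n k))

theorem inv_get? (n : List ((Int × Int) × List Int)) (d : PySem.Dict (Int × Int) (List Int))
    (h : DInv n d) (k : Int × Int) :
    d.get? k = if k ∈ n.map (·.1) then some (bestB n k) else none := by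
  unfold PySem.Dict.get?
  unfold DInv at h
  rw [h, find?_map_keyed _ _ _ (PySem.Set.nodup_ofList _)]
  by_cases hm : k ∈ n.map (·.1)
  · rw [if_pos ((PySem.Set.mem_ofList ..).mpr hm), if_pos hm]; rfl
  · rw [if_neg (fun hc => hm ((PySem.Set.mem_ofList ..).mp hc)), if_neg hm]; rfl


theorem inv_keys (n : List ((Int × Int) × List Int)) (d : PySem.Dict (Int × Int) (List Int))
    (h : DInv n d) : d.keys = PySem.Set.ofList (n.map (·.1)) := by
  unfold DInv at h
  have : d.keys = d.items.map (·.1) := by simp [PySem.Dict.keys]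
  rw [this, h, List.map_map]
  simp [Function.comp_def]

theorem inv_step (mapping : List (Int × Int)) (n : List ((Int × Int) × List Int))
    (d : PySem.Dict (Int × Int) (List Int)) (h : DInv n d) (e : Int × Int × List Int) :
    DInv (n ++ normOf mapping e) (remapStepA mapping d e) := by
  have hnd : d.keys.Nodup := by rw [inv_keys n d h]; exact PySem.Set.nodup_ofList _
  unfold remapStepA normOf normStepB
  cases pvLook mapping e.1 with
  | none => simpa using h
  | some u2 =>
  cases pvLook mapping e.2.1 with
  | none => simpa using h
  | some v2 =>
  by_cases heq : u2 = v2
  · simpa [heq] using h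
  · simp only [ne_eq, heq, not_false_iff, if_pos]
    have hkeyeq : (if u2 > v2 then ((v2, u2) : Int × Int) else (u2, v2)) = (min u2 v2, max u2 v2) := by
      rcases lt_trichotomy u2 v2 with hlt | hlt | hlt
      · rw [if_neg (by omega)]; congr 1 <;> omega
      · exact absurd hlt heq
      · rw [if_pos (by omega)]; congr 1 <;> omega
    rw [← hkeyeq]
    set key : Int × Int := if u2 > v2 then (v2, u2) else (u2, v2) with hkeydef
    set pix : List Int := e.2.2 with hpixdef
    by_cases hmem : key ∈ n.map (·.1)
    · -- key already grouped: A conditionally overwrites its slot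
      rw [inv_get? n d h key, if_pos hmem]
      have hcd : d.contains key = true := by
        rw [PySem.Dict.contains_eq_isSome_get?, inv_get? n d h key, if_pos hmem]; rfl
      have hA : (if pix.length > (bestB n key).length then d.insert key pix else d)
          = d.insert key (if pix.length > (bestB n key).length then pix else bestB n key) := by
        by_cases hlen : pix.length > (bestB n key).length
        · simp [hlen]
        · simp only [hlen, if_false]
          exact (insert_self_of_get? d key (bestB n key)
            (by rw [inv_get? n d h key, if_pos hmem]) hnd).symm
      show DInv (n ++ [(key, pix)]) (if pix.length > (bestB n key).length then d.insert key pix else d)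
      rw [hA]
      unfold DInv
      rw [PySem.Dict.items_insert_of_contains d _ hcd]
      unfold DInv at h
      rw [h, List.map_map, List.map_append, List.map_cons, List.map_nil,
        PySem.Set.ofList_append_singleton,
        PySem.Set.add_of_mem ((PySem.Set.mem_ofList ..).mpr hmem)]
      apply List.map_congr_left
      intro k' hk'
      have hk'mem : k' ∈ n.map (·.1) := (PySem.Set.mem_ofList ..).mp hk'
      by_cases hkk : k' = key
      · rw [hkk]
        simp only [Function.comp, beq_self_eq_true, if_pos]
        rw [bestB_append_old n key pix hmem]
      · simp only [Function.comp]
        rw [if_neg (by simp [hkk]), bestB_append_other n key k' pix hkk]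
    · -- fresh key: A appends a new slot
      rw [inv_get? n d h key, if_neg hmem]
      have hcd : d.contains key = false := by
        rw [PySem.Dict.contains_eq_isSome_get?, inv_get? n d h key, if_neg hmem]; rfl
      show DInv (n ++ [(key, pix)]) (d.insert key pix)
      unfold DInv
      rw [PySem.Dict.items_insert_of_not_contains d _ hcd]
      unfold DInv at h
      rw [h, List.map_append, List.map_cons, List.map_nil,
        PySem.Set.ofList_append_singleton,
        PySem.Set.add_of_not_mem (fun hc => hmem ((PySem.Set.mem_ofList ..).mp hc)),
        List.map_append, List.map_cons, List.map_nil]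
      congr 1
      · apply List.map_congr_left
        intro k' hk'
        have hkk : k' ≠ key := fun hk => hmem (hk ▸ (PySem.Set.mem_ofList ..).mp hk')
        rw [bestB_append_other n key k' pix hkk]
      · rw [bestB_append_new n key pix hmem]

theorem inv_loop (mapping : List (Int × Int)) (es : List (Int × Int × List Int)) :
    ∀ (n : List ((Int × Int) × List Int)) (d : PySem.Dict (Int × Int) (List Int)),
      DInv n d → DInv (n ++ es.flatMap (normOf mapping)) (es.foldl (remapStepA mapping) d) := by
  induction es with
  | nil => intro n d h; simpa using h
  | cons e es ih =>
      intro n d h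
      simp only [List.foldl_cons, List.flatMap_cons, ← List.append_assoc]
      exact ih _ _ (inv_step mapping n d h e)

-- ===== VERDICT (by name: the statement is the Claim_ definition above) =====
theorem remap_edges_spec : Claim_equal_remap_edges := by
  intro edges mapping _ _
  unfold Spec_remap_edges remap_edges remap_edges_alt
  dsimp only
  have hinv : DInv (edges.flatMap (normOf mapping)) (edges.foldl (remapStepA mapping) PySem.Dict.empty) := by
    have := inv_loop mapping edges [] PySem.Dict.empty (by unfold DInv; rfl)
    simpa using this
  set N := edges.flatMap (normOf mapping) with hN
  set uniq := edges.foldl (remapStepA mapping) PySem.Dict.empty with huniq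
  rw [norm_eq_flatMap mapping edges [], List.nil_append, firstKeys_eq, inv_keys N uniq hinv]
  apply List.map_congr_left
  intro k hk
  have hkmem : k ∈ N.map (·.1) := (PySem.Set.mem_ofList ..).mp hk
  have : uniq.getD k [] = bestB N k := by
    unfold PySem.Dict.getD
    rw [inv_get? N uniq hinv k, if_pos hkmem]
    rfl
  rw [this]
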